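-- pv_equiv track=rewrite | github.com/uh1205/algorithm | 프로그래머스/1/42840. 모의고사/모의고사.py | solution
-- ===== SOURCE A (Python) =====
-- def solution(answers):
--     student1 = [1, 2, 3, 4, 5]
--     student2 = [2, 1, 2, 3, 2, 4, 2, 5]
--     student3 = [3, 3, 1, 1, 2, 2, 4, 4, 5, 5]
--     count = [0, 0, 0]
--
--     for i, v in enumerate(answers):
--         if v == student1[i % 5]:
--             count[0] += 1
--         if v == student2[i % 8]:
--             count[1] += 1
--         if v == student3[i % 10]:
--             count[2] += 1
--
--     return [i + 1 for i, v in enumerate(count) if v == max(count)]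
-- ===== SOURCE B (Python) =====
-- def solution(answers):
--     # 40 = lcm(5, 8, 10): a position's residue mod 40 determines all three
--     # pattern answers there.  Build a histogram over (i % 40, value) once,
--     # then score each student by 40 dictionary lookups.
--     hist = {}
--     for i, v in enumerate(answers):
--         key = (i % 40, v)
--         hist[key] = hist.get(key, 0) + 1
--     patterns = [
--         [1, 2, 3, 4, 5],
--         [2, 1, 2, 3, 2, 4, 2, 5],
--         [3, 3, 1, 1, 2, 2, 4, 4, 5, 5],
--     ]
--     scores = [sum(hist.get((r, p[r % len(p)]), 0) for r in range(40))
--               for p in patterns]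
--     best = max(scores)
--     return [i + 1 for i, s in enumerate(scores) if s == best]
-- ===== Notes on version B (the rewrite author's own statement) =====
-- stated objective: alternative
-- what changed: Instead of comparing every answer against all three patterns in one scan, B builds a histogram dict keyed on (i % 40, value) in a single pass (40 = lcm of the pattern periods 5, 8, 10) and then scores each student with 40 dictionary lookups, so per-element pattern comparisons disappear entirely.
import Mathlib
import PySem

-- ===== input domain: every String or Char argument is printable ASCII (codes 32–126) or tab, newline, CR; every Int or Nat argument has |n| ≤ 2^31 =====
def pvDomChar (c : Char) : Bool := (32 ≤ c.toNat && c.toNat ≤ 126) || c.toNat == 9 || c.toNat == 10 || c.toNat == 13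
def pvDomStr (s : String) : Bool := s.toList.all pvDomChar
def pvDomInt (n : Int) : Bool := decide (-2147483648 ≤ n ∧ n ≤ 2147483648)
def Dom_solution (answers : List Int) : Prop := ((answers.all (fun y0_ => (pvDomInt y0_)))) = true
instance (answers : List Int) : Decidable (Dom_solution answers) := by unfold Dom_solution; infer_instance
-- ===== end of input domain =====

-- B replaces A's per-element triple comparison by a histogram keyed on (i % 40, value)
-- (40 = lcm of the pattern periods) built once, then 40 dict lookups per student (objective: alternative).

-- ===== PORT A =====
def solution (answers : List Int) : List Int :=
  let student1 : List Int := [1, 2, 3, 4, 5]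
  let student2 : List Int := [2, 1, 2, 3, 2, 4, 2, 5]
  let student3 : List Int := [3, 3, 1, 1, 2, 2, 4, 4, 5, 5]
  let count :=
    (PySem.List.enumerate answers 0).foldl
      (fun (c : Int × Int × Int) iv =>
        let c0 := if iv.2 = PySem.List.pyGetD student1 (PySem.Int.mod iv.1 5) 0 then c.1 + 1 else c.1
        let c1 := if iv.2 = PySem.List.pyGetD student2 (PySem.Int.mod iv.1 8) 0 then c.2.1 + 1 else c.2.1
        let c2 := if iv.2 = PySem.List.pyGetD student3 (PySem.Int.mod iv.1 10) 0 then c.2.2 + 1 else c.2.2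
        (c0, c1, c2)) (0, 0, 0)
  let countList : List Int := [count.1, count.2.1, count.2.2]
  let m := (PySem.List.max? countList id).getD 0
  ((PySem.List.enumerate countList 0).filter (fun iv => iv.2 = m)).map (fun iv => iv.1 + 1)

-- ===== PORT B =====
def solution_alt (answers : List Int) : List Int :=
  let hist :=
    (PySem.List.enumerate answers 0).foldl
      (fun (h : PySem.Dict (Int × Int) Int) iv =>
        let key : Int × Int := (PySem.Int.mod iv.1 40, iv.2)
        h.insert key (h.getD key 0 + 1)) PySem.Dict.empty
  let patterns : List (List Int) :=
    [[1, 2, 3, 4, 5], [2, 1, 2, 3, 2, 4, 2, 5], [3, 3, 1, 1, 2, 2, 4, 4, 5, 5]]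
  let scores := patterns.map (fun p =>
    ((PySem.List.pyRange 0 40 1).map (fun r =>
      hist.getD (r, PySem.List.pyGetD p (PySem.Int.mod r (p.length : Int)) 0) 0)).sum)
  let best := (PySem.List.max? scores id).getD 0
  ((PySem.List.enumerate scores 0).filter (fun is => is.2 = best)).map (fun is => is.1 + 1)

-- ===== PRECONDITION & SPEC =====
def Spec_solution (answers : List Int) (out : List Int) : Prop := out = solution_alt answers
instance (answers : List Int) (out : List Int) : Decidable (Spec_solution answers out) := by unfold Spec_solution; infer_instance

-- ===== CLAIM (what is proved, stated in full; the proofs are below) =====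
def Claim_equal_solution : Prop := ∀ (answers : List Int), Dom_solution answers → Spec_solution answers (solution answers)

-- ===== LEMMAS AND PROOFS =====

-- A's fused fold equals the triple of per-pattern 0/1-sums, for any start index and accumulator.
lemma fold_eq_scores (xs : List Int) : ∀ (s a b c : Int),
    (PySem.List.enumerate xs s).foldl
      (fun (c : Int × Int × Int) iv =>
        let c0 := if iv.2 = PySem.List.pyGetD [1, 2, 3, 4, 5] (PySem.Int.mod iv.1 5) 0 then c.1 + 1 else c.1
        let c1 := if iv.2 = PySem.List.pyGetD [2, 1, 2, 3, 2, 4, 2, 5] (PySem.Int.mod iv.1 8) 0 then c.2.1 + 1 else c.2.1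
        let c2 := if iv.2 = PySem.List.pyGetD [3, 3, 1, 1, 2, 2, 4, 4, 5, 5] (PySem.Int.mod iv.1 10) 0 then c.2.2 + 1 else c.2.2
        (c0, c1, c2)) (a, b, c)
    = (a + ((PySem.List.enumerate xs s).map
          (fun ia => if ia.2 = PySem.List.pyGetD [1, 2, 3, 4, 5] (PySem.Int.mod ia.1 5) 0 then (1 : Int) else 0)).sum,
       b + ((PySem.List.enumerate xs s).map
          (fun ia => if ia.2 = PySem.List.pyGetD [2, 1, 2, 3, 2, 4, 2, 5] (PySem.Int.mod ia.1 8) 0 then (1 : Int) else 0)).sum,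
       c + ((PySem.List.enumerate xs s).map
          (fun ia => if ia.2 = PySem.List.pyGetD [3, 3, 1, 1, 2, 2, 4, 4, 5, 5] (PySem.Int.mod ia.1 10) 0 then (1 : Int) else 0)).sum) := by
  induction xs with
  | nil => intro s a b c; simp [PySem.List.enumerate_nil]
  | cons x xs ih =>
    intro s a b c
    simp only [PySem.List.enumerate_cons, List.foldl_cons, List.map_cons, List.sum_cons]
    rw [ih]
    refine Prod.ext ?_ (Prod.ext ?_ ?_) <;> simp <;> split_ifs <;> ring

-- On a duplicate-free list containing a, the 0/1 indicator of a sums to 1.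
lemma sum_indicator_one (rs : List Int) (a : Int) (hnd : rs.Nodup) (ha : a ∈ rs) :
    (rs.map (fun r => if r = a then (1 : Int) else 0)).sum = 1 := by
  induction rs with
  | nil => cases ha
  | cons r rs ih =>
    by_cases hra : r = a
    · subst hra
      have hnotin : r ∉ rs := (List.nodup_cons.mp hnd).1
      have hz : rs.map (fun x => if x = r then (1 : Int) else 0) = rs.map (fun _ => (0 : Int)) := by
        apply List.map_congr_left
        intro x hx
        have : x ≠ r := fun he => hnotin (he ▸ hx)
        simp [this]
      simp [hz]
    · have hmem : a ∈ rs := by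
        rcases List.mem_cons.mp ha with h | h
        · exact absurd h.symm hra
        · exact h
      simp [hra, ih (List.nodup_cons.mp hnd).2 hmem]

-- Summing a histogram's counts of (r, f r) over a list containing each key's residue
-- exactly once recovers the number of pairs matching their residue's expected value.
lemma sum_count_pairs (f : Int → Int) (rs : List Int) (hnd : rs.Nodup) :
    ∀ (ks : List (Int × Int)), (∀ k ∈ ks, k.1 ∈ rs) →
    (rs.map (fun r => ((ks.count (r, f r) : Nat) : Int))).sum
      = ((ks.countP (fun k => decide (k.2 = f k.1)) : Nat) : Int) := by
  intro ks
  induction ks with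
  | nil => intro _; simp
  | cons k ks ih =>
    intro hmem
    have hks : ∀ k' ∈ ks, k'.1 ∈ rs := fun k' h => hmem k' (List.mem_cons_of_mem _ h)
    have hsum : (rs.map (fun r => ((((k :: ks).count (r, f r) : Nat)) : Int))).sum
        = (rs.map (fun r => ((ks.count (r, f r) : Nat) : Int))).sum
          + (rs.map (fun r => if (r, f r) = k then (1 : Int) else 0)).sum := by
      rw [← List.sum_map_add]
      apply congrArg
      apply List.map_congr_left
      intro r _
      rw [List.count_cons]
      by_cases h : (r, f r) = k
      · simp [h]
      · have : ¬ (k = (r, f r)) := fun he => h he.symm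
        simp [this, h]
    rw [hsum, ih hks]
    have hone : (rs.map (fun r => if (r, f r) = k then (1 : Int) else 0)).sum
        = if k.2 = f k.1 then (1 : Int) else 0 := by
      by_cases hv : k.2 = f k.1
      · have h1 : rs.map (fun r => if (r, f r) = k then (1 : Int) else 0)
            = rs.map (fun r => if r = k.1 then (1 : Int) else 0) := by
          apply List.map_congr_left
          intro r _
          congr 1
          simp only [eq_iff_iff]
          constructor
          · intro he; exact (congrArg Prod.fst he)
          · intro he; subst he; exact Prod.ext rfl hv.symm
        rw [h1, sum_indicator_one rs k.1 hnd (hmem k (List.mem_cons_self))]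
        simp [hv]
      · have h0 : rs.map (fun r => if (r, f r) = k then (1 : Int) else 0)
            = rs.map (fun _ => (0 : Int)) := by
          apply List.map_congr_left
          intro r _
          have : ¬ ((r, f r) = k) := by
            intro he
            exact hv (by rw [← he])
          simp [this]
        simp [h0, hv]
    rw [hone]
    rw [List.countP_cons]
    by_cases hv : k.2 = f k.1 <;> simp [hv]

-- Every histogram key produced from enumerate answers 0 has residue in range(40).
lemma key_mem_range (answers : List Int) :
    ∀ k ∈ (PySem.List.enumerate answers 0).map
        (fun iv => ((PySem.Int.mod iv.1 40, iv.2) : Int × Int)), k.1 ∈ PySem.List.pyRange 0 40 1 := by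
  intro k hk
  rcases List.mem_map.mp hk with ⟨iv, _, rfl⟩
  rw [PySem.List.mem_pyRange_one]
  exact ⟨PySem.Int.mod_nonneg _ (by norm_num), PySem.Int.mod_lt _ (by norm_num)⟩

-- For nonnegative i and L ∣ 40: (i % 40) % L = i % L.
lemma mod40_mod (i L : Int) (_hi : 0 ≤ i) (hL : 0 < L) (hd : L ∣ 40) :
    PySem.Int.mod (PySem.Int.mod i 40) L = PySem.Int.mod i L := by
  rw [PySem.Int.mod_eq_emod_of_pos (by norm_num : (0:Int) < 40),
      PySem.Int.mod_eq_emod_of_pos hL, PySem.Int.mod_eq_emod_of_pos hL]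
  exact Int.emod_emod_of_dvd i hd

-- One student's B-score equals the A-side 0/1-sum, for each of the three patterns.
set_option maxHeartbeats 1000000 in
lemma score_eq (answers : List Int) (p : List Int) (hL : 0 < (p.length : Int))
    (hd : (p.length : Int) ∣ 40) :
    ((PySem.List.pyRange 0 40 1).map (fun r =>
        (((PySem.List.enumerate answers 0).foldl
          (fun (h : PySem.Dict (Int × Int) Int) iv =>
            h.insert (PySem.Int.mod iv.1 40, iv.2)
              (h.getD (PySem.Int.mod iv.1 40, iv.2) 0 + 1)) PySem.Dict.empty).getD
          (r, PySem.List.pyGetD p (PySem.Int.mod r (p.length : Int)) 0) 0))).sum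
    = ((PySem.List.enumerate answers 0).map
        (fun ia => if ia.2 = PySem.List.pyGetD p (PySem.Int.mod ia.1 (p.length : Int)) 0
                   then (1 : Int) else 0)).sum := by
  set f : Int → Int := fun r => PySem.List.pyGetD p (PySem.Int.mod r (p.length : Int)) 0 with hf
  set ks : List (Int × Int) :=
    (PySem.List.enumerate answers 0).map (fun iv => (PySem.Int.mod iv.1 40, iv.2)) with hks
  have hfold : (PySem.List.enumerate answers 0).foldl
      (fun (h : PySem.Dict (Int × Int) Int) iv =>
        h.insert (PySem.Int.mod iv.1 40, iv.2)
          (h.getD (PySem.Int.mod iv.1 40, iv.2) 0 + 1)) PySem.Dict.empty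
      = ks.foldl (fun h k => h.insert k (h.getD k 0 + 1)) PySem.Dict.empty := by
    rw [hks, List.foldl_map]
  have hget : ∀ r : Int,
      ((ks.foldl (fun h k => h.insert k (h.getD k 0 + 1)) PySem.Dict.empty).getD (r, f r) 0)
        = ((ks.count (r, f r) : Nat) : Int) := by
    intro r
    rw [PySem.Dict.getD_foldl_insert_add_one]
    simp
  have h1 : ((PySem.List.pyRange 0 40 1).map (fun r =>
      (((PySem.List.enumerate answers 0).foldl
        (fun (h : PySem.Dict (Int × Int) Int) iv =>
          h.insert (PySem.Int.mod iv.1 40, iv.2)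
            (h.getD (PySem.Int.mod iv.1 40, iv.2) 0 + 1)) PySem.Dict.empty).getD (r, f r) 0))).sum
      = (((PySem.List.pyRange 0 40 1)).map (fun r => ((ks.count (r, f r) : Nat) : Int))).sum := by
    apply congrArg
    apply List.map_congr_left
    intro r _
    rw [hfold, hget]
  rw [h1, sum_count_pairs f _ (by decide) ks (key_mem_range answers)]
  rw [hks, List.countP_map]
  rw [← PySem.List.sum_map_ite_one_zero]
  apply congrArg
  apply List.map_congr_left
  intro iv hiv
  rcases (PySem.List.mem_enumerate_iff _ _ _).mp hiv with ⟨k, hklt, rfl⟩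
  simp only [Function.comp]
  rw [hf]
  simp only [zero_add]
  rw [mod40_mod (k : Int) (p.length : Int) (Int.natCast_nonneg k) hL hd]
  simp

-- ===== VERDICT (by name: the statement is the Claim_ definition above) =====
theorem solution_spec : Claim_equal_solution := by
  intro answers _
  unfold Spec_solution solution solution_alt
  simp only [List.map_cons, List.map_nil]
  rw [fold_eq_scores]
  simp only [score_eq answers [1, 2, 3, 4, 5] (by norm_num) (by norm_num),
      score_eq answers [2, 1, 2, 3, 2, 4, 2, 5] (by norm_num) (by norm_num),
      score_eq answers [3, 3, 1, 1, 2, 2, 4, 4, 5, 5] (by norm_num) (by norm_num)]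
  norm_num
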